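-- pv_equiv track=rewrite | github.com/emarberg/schurp | keys.py | maximal_increasing_factors
-- ===== SOURCE A (Python) =====
-- def maximal_increasing_factors(w):
--     factors = [[]]
--     for a in w:
--         if len(factors[-1]) == 0 or factors[-1][-1] < a:
--             factors[-1].append(a)
--         else:
--             factors.append([a])
--     return tuple(tuple(a) for a in factors)
-- ===== SOURCE B (Python) =====
-- def maximal_increasing_factors(w):
--     n = len(w)
--     bounds = [0] + [i for i in range(1, n) if w[i - 1] >= w[i]] + [n]
--     return tuple(tuple(w[a:b]) for a, b in zip(bounds, bounds[1:]))
-- ===== Notes on version B (the rewrite author's own statement) =====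
-- stated objective: alternative
-- what changed: B computes all run-break boundary indices in one pass and then slices the input at consecutive boundaries, instead of A's incremental append into a growing list-of-lists.
import Mathlib
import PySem

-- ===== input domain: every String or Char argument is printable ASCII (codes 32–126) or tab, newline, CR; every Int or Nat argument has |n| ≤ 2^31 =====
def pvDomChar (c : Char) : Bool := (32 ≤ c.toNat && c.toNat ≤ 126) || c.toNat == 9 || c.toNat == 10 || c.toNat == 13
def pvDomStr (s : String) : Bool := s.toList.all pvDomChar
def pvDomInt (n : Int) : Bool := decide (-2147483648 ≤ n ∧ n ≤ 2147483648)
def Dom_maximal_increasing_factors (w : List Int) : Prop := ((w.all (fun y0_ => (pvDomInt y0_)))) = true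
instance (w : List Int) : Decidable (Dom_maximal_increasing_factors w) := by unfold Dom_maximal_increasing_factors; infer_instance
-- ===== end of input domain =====

-- B replaces A's incremental append into a growing list-of-lists by a boundary-index pass
-- followed by a slicing pass (objective: alternative decomposition, same O(n) cost).

-- ===== PORT A =====
-- one iteration of A's for-loop: factors[-1] is the last list, appended in place or a new [a] pushed
def stepA (factors : List (List Int)) (a : Int) : List (List Int) :=
  let last := (factors.getLast?).getD []
  if last = [] ∨ (last.getLast?).getD 0 < a then
    factors.dropLast ++ [last ++ [a]]
  else
    factors ++ [[a]]

def maximal_increasing_factors (w : List Int) : List (List Int) :=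
  w.foldl stepA [[]]

-- ===== PORT B =====
-- bounds = [0] + [i for i in range(1, n) if w[i-1] >= w[i]] + [n]
-- (the indices i-1, i are always in range there, so pyGetD with default 0 is exact)
def bndsB (w : List Int) : List Int :=
  [0] ++ (PySem.List.pyRange 1 (w.length : Int)).filter
      (fun i => decide (PySem.List.pyGetD w i 0 ≤ PySem.List.pyGetD w (i - 1) 0))
    ++ [(w.length : Int)]

def maximal_increasing_factors_alt (w : List Int) : List (List Int) :=
  ((bndsB w).zip (bndsB w).tail).map (fun p => PySem.List.slice w (some p.1) (some p.2))

-- ===== PRECONDITION & SPEC =====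
def Spec_maximal_increasing_factors (w : List Int) (out : List (List Int)) : Prop := out = maximal_increasing_factors_alt w
instance (w : List Int) (out : List (List Int)) : Decidable (Spec_maximal_increasing_factors w out) := by unfold Spec_maximal_increasing_factors; infer_instance

-- ===== CLAIM (what is proved, stated in full; the proofs are below) =====
def Claim_equal_maximal_increasing_factors : Prop := ∀ (w : List Int), Dom_maximal_increasing_factors w → Spec_maximal_increasing_factors w (maximal_increasing_factors w)

-- ===== LEMMAS AND PROOFS =====

-- consecutive pairs: zip bs bs.tail as a structural recursion
def pairs : List Int → List (Int × Int)
  | [] => []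
  | [_] => []
  | x :: y :: r => (x, y) :: pairs (y :: r)

theorem zip_tail_eq_pairs (bs : List Int) : bs.zip bs.tail = pairs bs := by
  induction bs with
  | nil => rfl
  | cons x t ih =>
      cases t with
      | nil => rfl
      | cons y r => simpa [pairs, List.zip] using ih

theorem pairs_append_singleton (bs : List Int) (hb : bs ≠ []) (x : Int) :
    pairs (bs ++ [x]) = pairs bs ++ [(bs.getLast hb, x)] := by
  induction bs with
  | nil => exact absurd rfl hb
  | cons y t ih =>
      cases t with
      | nil => rfl
      | cons z r =>
          have ih' := ih (by simp)
          simp only [List.cons_append] at ih' ⊢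
          simp [pairs, ih', List.getLast_cons]

theorem mem_pairs {bs : List Int} {p : Int × Int} (h : p ∈ pairs bs) :
    p.1 ∈ bs ∧ p.2 ∈ bs := by
  induction bs with
  | nil => simp [pairs] at h
  | cons y t ih =>
      cases t with
      | nil => simp [pairs] at h
      | cons z r =>
          simp only [pairs, List.mem_cons] at h
          rcases h with h | h
          · subst h; simp
          · rcases ih h with ⟨h1, h2⟩
            exact ⟨List.mem_cons_of_mem _ h1, List.mem_cons_of_mem _ h2⟩

-- the middle (filtered) boundary list of B
def midB (w : List Int) : List Int :=
  (PySem.List.pyRange 1 (w.length : Int)).filter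
    (fun i => decide (PySem.List.pyGetD w i 0 ≤ PySem.List.pyGetD w (i - 1) 0))

theorem bndsB_eq (w : List Int) : bndsB w = (0 :: midB w) ++ [(w.length : Int)] := by
  simp [bndsB, midB]

theorem mem_midB {w : List Int} {i : Int} (h : i ∈ midB w) : 1 ≤ i ∧ i < (w.length : Int) := by
  have := List.mem_of_mem_filter h
  exact (PySem.List.mem_pyRange_one).1 this

-- slices with both bounds ≤ |w| are unchanged by appending an element
theorem slice_stable (w : List Int) (a : Int) {p q : Int}
    (hp : 0 ≤ p) (hq : 0 ≤ q) (hqn : q ≤ (w.length : Int)) :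
    PySem.List.slice (w ++ [a]) (some p) (some q) = PySem.List.slice w (some p) (some q) := by
  rw [PySem.List.slice_toNat _ hp hq, PySem.List.slice_toNat _ hp hq]
  by_cases hpw : p.toNat ≤ w.length
  · rw [List.drop_append_of_le_length hpw]
    have : q.toNat - p.toNat ≤ (w.drop p.toNat).length := by
      simp [List.length_drop]; omega
    rw [List.take_append_of_le_length this]
  · have h1 : w.drop p.toNat = [] := by
      apply List.drop_eq_nil_of_le; omega
    have h2 : (w ++ [a]).drop p.toNat = [] := by
      apply List.drop_eq_nil_of_le; simp; omega
    have : q.toNat ≤ p.toNat := by omega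
    rw [h1, h2]

-- the closing slice grows by exactly the appended element
theorem slice_extend (w : List Int) (a : Int) {b : Int}
    (hb : 0 ≤ b) (hbn : b ≤ (w.length : Int)) :
    PySem.List.slice (w ++ [a]) (some b) (some ((w.length : Int) + 1)) =
      PySem.List.slice w (some b) (some (w.length : Int)) ++ [a] := by
  rw [PySem.List.slice_toNat _ hb (by omega), PySem.List.slice_toNat _ hb (by simp)]
  have hbw : b.toNat ≤ w.length := by omega
  rw [List.drop_append_of_le_length hbw]
  have hlen : ((w.length : Int) + 1).toNat - b.toNat = (w.drop b.toNat).length + 1 := by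
    simp [List.length_drop]; omega
  rw [hlen]
  rw [List.take_of_length_le (by simp)]
  have : (w.length : Int).toNat - b.toNat = w.length - b.toNat := by omega
  rw [this, List.take_of_length_le (by simp)]

theorem midB_snoc (w : List Int) (h : w ≠ []) (a : Int) :
    midB (w ++ [a]) =
      midB w ++ (if a ≤ w.getLast h then [(w.length : Int)] else []) := by
  have hlen : ((w ++ [a]).length : Int) = (w.length : Int) + 1 := by simp
  have h1 : (1 : Int) ≤ (w.length : Int) := by
    have := List.length_pos_iff.2 h; omega
  unfold midB
  rw [hlen, PySem.List.pyRange_one_succ_right h1, List.filter_append]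
  congr 1
  · -- the filter over range(1, n) sees only indices < n, where w ++ [a] reads w
    apply List.filter_congr
    intro i hi
    rcases (PySem.List.mem_pyRange_one).1 hi with ⟨hi1, hi2⟩
    have e1 : PySem.List.pyGetD (w ++ [a]) i 0 = PySem.List.pyGetD w i 0 := by
      rw [PySem.List.pyGetD_of_nonneg _ _ (by omega), PySem.List.pyGetD_of_nonneg _ _ (by omega)]
      have : i.toNat < w.length := by omega
      simp [List.getD, List.getElem?_append_left this]
    have e2 : PySem.List.pyGetD (w ++ [a]) (i - 1) 0 = PySem.List.pyGetD w (i - 1) 0 := by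
      rw [PySem.List.pyGetD_of_nonneg _ _ (by omega), PySem.List.pyGetD_of_nonneg _ _ (by omega)]
      have h3 : i.toNat - 1 < w.length := by omega
      have h4 : (i - 1).toNat = i.toNat - 1 := by omega
      simp [List.getD, h4, List.getElem?_append_left h3]
    rw [e1, e2]
  · -- the new index n: compares w[-1] with a
    have e1 : PySem.List.pyGetD (w ++ [a]) (w.length : Int) 0 = a := by
      rw [PySem.List.pyGetD_of_nonneg _ _ (by omega)]
      simp [List.getD]
    have e2 : PySem.List.pyGetD (w ++ [a]) ((w.length : Int) - 1) 0 = w.getLast h := by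
      rw [PySem.List.pyGetD_of_nonneg _ _ (by omega)]
      have hwl : ((w.length : Int) - 1).toNat = w.length - 1 := by omega
      rw [hwl]
      have hlt : w.length - 1 < w.length := by
        have := List.length_pos_iff.2 h; omega
      have hlt2 : w.length - 1 < (w ++ [a]).length := by
        simp only [List.length_append, List.length_cons, List.length_nil]; omega
      simp only [List.getD, List.getElem?_eq_getElem hlt2, Option.getD_some]
      rw [List.getElem_append_left hlt, List.getLast_eq_getElem]
    by_cases hc : a ≤ w.getLast h
    all_goals simp [List.filter, e1, e2, hc]

theorem B_snoc (w : List Int) (h : w ≠ []) (a : Int) :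
    maximal_increasing_factors_alt (w ++ [a]) =
      if w.getLast h < a then
        (maximal_increasing_factors_alt w).dropLast ++
          [((maximal_increasing_factors_alt w).getLast?).getD [] ++ [a]]
      else
        maximal_increasing_factors_alt w ++ [[a]] := by
  have hcs : (0 :: midB w) ≠ [] := by simp
  have hlast_le : ∀ x ∈ (0 :: midB w), 0 ≤ x ∧ x ≤ (w.length : Int) := by
    intro x hx
    rcases List.mem_cons.1 hx with hx | hx
    · subst hx; constructor <;> simp
    · rcases mem_midB hx with ⟨h1, h2⟩; omega
  have hBw : maximal_increasing_factors_alt w =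
      (pairs (0 :: midB w)).map (fun p => PySem.List.slice w (some p.1) (some p.2)) ++
        [PySem.List.slice w (some ((0 :: midB w).getLast hcs)) (some (w.length : Int))] := by
    unfold maximal_increasing_factors_alt
    rw [zip_tail_eq_pairs, bndsB_eq, pairs_append_singleton _ hcs]
    simp
  have hlen1 : ((w ++ [a]).length : Int) = (w.length : Int) + 1 := by simp
  have hB' : maximal_increasing_factors_alt (w ++ [a]) =
      (pairs (bndsB (w ++ [a]))).map
        (fun p => PySem.List.slice (w ++ [a]) (some p.1) (some p.2)) := by
    unfold maximal_increasing_factors_alt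
    rw [zip_tail_eq_pairs]
  by_cases hc : w.getLast h < a
  · -- no break at the junction: last slice extends
    have hmid : midB (w ++ [a]) = midB w := by
      rw [midB_snoc w h a, if_neg (by omega)]; simp
    rw [hB', bndsB_eq, hlen1, hmid, pairs_append_singleton _ hcs, if_pos hc]
    rw [List.map_append]
    have hstable : ∀ p ∈ pairs (0 :: midB w),
        PySem.List.slice (w ++ [a]) (some p.1) (some p.2) =
          PySem.List.slice w (some p.1) (some p.2) := by
      intro p hp
      rcases mem_pairs hp with ⟨h1, h2⟩
      exact slice_stable w a (hlast_le _ h1).1 (hlast_le _ h2).1 (hlast_le _ h2).2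
    rw [List.map_congr_left hstable]
    have hb := hlast_le _ (List.getLast_mem hcs)
    rw [hBw]
    simp only [List.map_cons, List.map_nil, List.getLast?_append, List.dropLast_concat]
    rw [slice_extend w a hb.1 hb.2]
    simp
  · -- break at the junction: a new slice [a] is appended
    have hmid : midB (w ++ [a]) = midB w ++ [(w.length : Int)] := by
      rw [midB_snoc w h a, if_pos (by omega)]
    rw [hB', bndsB_eq, hlen1, hmid, if_neg hc]
    have hcs' : ((0 : Int) :: (midB w ++ [(w.length : Int)])) = (0 :: midB w) ++ [(w.length : Int)] := by simp
    rw [hcs', pairs_append_singleton _ (by simp), pairs_append_singleton _ hcs]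
    have hgl : ((0 :: midB w) ++ [(w.length : Int)]).getLast (by simp) = (w.length : Int) :=
      List.getLast_append_singleton _
    rw [hgl, List.map_append, List.map_append]
    have hstable : ∀ p ∈ pairs (0 :: midB w),
        PySem.List.slice (w ++ [a]) (some p.1) (some p.2) =
          PySem.List.slice w (some p.1) (some p.2) := by
      intro p hp
      rcases mem_pairs hp with ⟨h1, h2⟩
      exact slice_stable w a (hlast_le _ h1).1 (hlast_le _ h2).1 (hlast_le _ h2).2
    rw [List.map_congr_left hstable]
    have hb := hlast_le _ (List.getLast_mem hcs)
    have hsingle : PySem.List.slice (w ++ [a]) (some (w.length : Int)) (some ((w.length : Int) + 1)) = [a] := by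
      rw [PySem.List.slice_toNat _ (by simp) (by omega)]
      simp
    have hclose : PySem.List.slice (w ++ [a]) (some ((0 :: midB w).getLast hcs)) (some (w.length : Int)) =
        PySem.List.slice w (some ((0 :: midB w).getLast hcs)) (some (w.length : Int)) :=
      slice_stable w a hb.1 (by simp) (by simp)
    simp only [List.map_cons, List.map_nil]
    rw [hsingle, hclose, hBw]

-- A's accumulator always ends with a nonempty factor whose last element is w's last
theorem A_shape (w : List Int) :
    w = [] ∨ ∃ fs l x, maximal_increasing_factors w = fs ++ [l ++ [x]] ∧ w.getLast? = some x := by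
  induction w using List.reverseRecOn with
  | nil => exact Or.inl rfl
  | append_singleton w a ih =>
      right
      have hsnoc : maximal_increasing_factors (w ++ [a]) =
          stepA (maximal_increasing_factors w) a := by
        unfold maximal_increasing_factors
        rw [List.foldl_append]; rfl
      rcases ih with hw | ⟨fs, l, x, hfix, _⟩
      · subst hw
        refine ⟨[], [], a, ?_, by simp⟩
        rw [hsnoc]
        simp [maximal_increasing_factors, stepA]
      · rw [hsnoc, hfix]
        unfold stepA
        simp only [List.getLast?_append, List.getLast?_singleton]
        by_cases hc : x < a
        · refine ⟨fs, l ++ [x], a, ?_, by simp⟩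
          rw [if_pos (by simp [hc])]
          simp
        · refine ⟨fs ++ [l ++ [x]], [], a, ?_, by simp⟩
          rw [if_neg (by simp; omega)]
          simp

theorem A_snoc_eval (w : List Int) (h : w ≠ []) (a : Int) :
    maximal_increasing_factors (w ++ [a]) =
      if w.getLast h < a then
        (maximal_increasing_factors w).dropLast ++
          [((maximal_increasing_factors w).getLast?).getD [] ++ [a]]
      else
        maximal_increasing_factors w ++ [[a]] := by
  rcases A_shape w with hw | ⟨fs, l, x, hfix, hlx⟩
  · exact absurd hw h
  have hx : x = w.getLast h := by
    rw [List.getLast?_eq_some_getLast h] at hlx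
    exact (Option.some_injective _ hlx).symm
  have hsnoc : maximal_increasing_factors (w ++ [a]) =
      stepA (maximal_increasing_factors w) a := by
    unfold maximal_increasing_factors
    rw [List.foldl_append]; rfl
  rw [hsnoc, hfix]
  unfold stepA
  simp only [List.getLast?_append, List.getLast?_singleton]
  by_cases hc : x < a
  · rw [if_pos (by simp [hc]), if_pos (hx ▸ hc)]
  · rw [if_neg (by simp; omega), if_neg (hx ▸ hc)]

theorem A_eq_B (w : List Int) :
    maximal_increasing_factors w = maximal_increasing_factors_alt w := by
  induction w using List.reverseRecOn with
  | nil => decide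
  | append_singleton w a ih =>
      by_cases hw : w = []
      · subst hw
        have hA : maximal_increasing_factors ([] ++ [a]) = [[a]] := by
          simp [maximal_increasing_factors, stepA]
        have hB : maximal_increasing_factors_alt ([] ++ [a]) = [[a]] := by
          unfold maximal_increasing_factors_alt bndsB
          rw [List.nil_append]
          have : PySem.List.pyRange 1 (([a] : List Int).length : Int) = [] :=
            PySem.List.pyRange_one_eq_nil (by simp)
          rw [this]
          have hs : PySem.List.slice ([a] : List Int) none (some 1) = [a] := by
            rw [PySem.List.slice_to _ (by norm_num)]
            simp
          simp [hs]
        rw [hA, hB]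
      · rw [A_snoc_eval w hw a, B_snoc w hw a, ih]

-- ===== VERDICT (by name: the statement is the Claim_ definition above) =====
theorem maximal_increasing_factors_spec : Claim_equal_maximal_increasing_factors := by
  intro w _
  unfold Spec_maximal_increasing_factors
  exact A_eq_B w
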